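-- pv_equiv track=rewrite | github.com/JeremyCBrooks/dreadnought | world/dungeon_gen.py | _on_dock_perimeter
-- ===== SOURCE A (Python) =====
-- _DOCK_SIZE = 8  # bounding box side (tiles span 0..SIZE → SIZE+1 tiles per axis)
--
-- _DOCK_CUT = 2  # corner cut depth for the octagon
--
-- def _in_dock_octagon(dx: int, dy: int, size: int = _DOCK_SIZE, cut: int = _DOCK_CUT) -> bool:
--     """Return True if offset (dx, dy) within a *size*×*size* rect is inside the octagon."""
--     return dx + dy >= cut and dx + dy <= 2 * size - cut and size - dx + dy >= cut and dx + size - dy >= cut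
--
-- def _on_dock_perimeter(dx: int, dy: int, size: int = _DOCK_SIZE, cut: int = _DOCK_CUT) -> bool:
--     """Return True if (dx, dy) is on the octagon edge.
--
--     Uses 8-directional neighbour check so diagonal corner transitions are
--     filled in, producing a visually unbroken outline.
--     """
--     if not _in_dock_octagon(dx, dy, size, cut):
--         return False
--     for ndx, ndy in (
--         (dx - 1, dy),
--         (dx + 1, dy),
--         (dx, dy - 1),
--         (dx, dy + 1),
--         (dx - 1, dy - 1),
--         (dx + 1, dy - 1),
--         (dx - 1, dy + 1),
--         (dx + 1, dy + 1),
--     ):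
--         if not _in_dock_octagon(ndx, ndy, size, cut):
--             return True
--     return False
-- ===== SOURCE B (Python) =====
-- def _in_dock_octagon(dx: int, dy: int, size: int = 8, cut: int = 2) -> bool:
--     return dx + dy >= cut and dx + dy <= 2 * size - cut and size - dx + dy >= cut and dx + size - dy >= cut
--
-- def _on_dock_perimeter(dx: int, dy: int, size: int = 8, cut: int = 2) -> bool:
--     if not _in_dock_octagon(dx, dy, size, cut):
--         return False
--     return (dx + dy <= cut + 1 or dx + dy >= 2 * size - cut - 1
--             or size - dx + dy <= cut + 1 or dx + size - dy <= cut + 1)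
-- ===== Notes on version B (the rewrite author's own statement) =====
-- stated objective: simpler
-- what changed: Replaced the 8-neighbour loop with a single closed-form predicate: a point is on the perimeter iff it is inside the octagon and one of the four linear constraints is within 2 of failing (the extremal diagonal neighbour shifts each linear form by exactly 2).
import Mathlib
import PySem

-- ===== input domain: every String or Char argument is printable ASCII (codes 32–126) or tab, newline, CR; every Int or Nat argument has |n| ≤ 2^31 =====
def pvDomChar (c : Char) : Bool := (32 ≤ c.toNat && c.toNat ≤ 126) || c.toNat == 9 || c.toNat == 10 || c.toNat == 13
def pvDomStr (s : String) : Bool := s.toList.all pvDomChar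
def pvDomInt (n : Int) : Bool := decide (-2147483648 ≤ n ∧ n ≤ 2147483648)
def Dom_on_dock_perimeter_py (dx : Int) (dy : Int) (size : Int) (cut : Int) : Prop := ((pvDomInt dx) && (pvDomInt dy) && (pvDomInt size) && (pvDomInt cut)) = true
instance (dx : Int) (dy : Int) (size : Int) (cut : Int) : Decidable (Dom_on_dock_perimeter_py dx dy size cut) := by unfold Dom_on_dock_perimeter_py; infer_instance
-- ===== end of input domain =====

-- B replaces A's 8-neighbour loop with one closed-form "within 2 of a constraint boundary" test (simpler).

-- ===== PORT A =====
-- port of _in_dock_octagon (used by both Pythons)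
def in_dock_octagon (dx : Int) (dy : Int) (size : Int) (cut : Int) : Bool :=
  decide (dx + dy ≥ cut) && decide (dx + dy ≤ 2 * size - cut) &&
  decide (size - dx + dy ≥ cut) && decide (dx + size - dy ≥ cut)

def on_dock_perimeter_py (dx : Int) (dy : Int) (size : Int) (cut : Int) : Bool :=
  if !(in_dock_octagon dx dy size cut) then false
  else
    [(dx - 1, dy), (dx + 1, dy), (dx, dy - 1), (dx, dy + 1),
     (dx - 1, dy - 1), (dx + 1, dy - 1), (dx - 1, dy + 1), (dx + 1, dy + 1)].any
      (fun p => !(in_dock_octagon p.1 p.2 size cut))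

-- ===== PORT B =====
def on_dock_perimeter_py_alt (dx : Int) (dy : Int) (size : Int) (cut : Int) : Bool :=
  if !(in_dock_octagon dx dy size cut) then false
  else
    decide (dx + dy ≤ cut + 1) || decide (dx + dy ≥ 2 * size - cut - 1) ||
    decide (size - dx + dy ≤ cut + 1) || decide (dx + size - dy ≤ cut + 1)

-- ===== PRECONDITION & SPEC =====
def Spec_on_dock_perimeter_py (dx : Int) (dy : Int) (size : Int) (cut : Int) (out : Bool) : Prop := out = on_dock_perimeter_py_alt dx dy size cut
instance (dx : Int) (dy : Int) (size : Int) (cut : Int) (out : Bool) : Decidable (Spec_on_dock_perimeter_py dx dy size cut out) := by unfold Spec_on_dock_perimeter_py; infer_instance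

-- ===== CLAIM (what is proved, stated in full; the proofs are below) =====
def Claim_equal_on_dock_perimeter_py : Prop := ∀ (dx : Int) (dy : Int) (size : Int) (cut : Int), Dom_on_dock_perimeter_py dx dy size cut → Spec_on_dock_perimeter_py dx dy size cut (on_dock_perimeter_py dx dy size cut)

-- ===== LEMMAS AND PROOFS =====

-- ===== VERDICT (by name: the statement is the Claim_ definition above) =====
theorem on_dock_perimeter_py_spec : Claim_equal_on_dock_perimeter_py := by
  intro dx dy size cut _
  unfold Spec_on_dock_perimeter_py on_dock_perimeter_py on_dock_perimeter_py_alt in_dock_octagon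
  rw [Bool.eq_iff_iff]
  simp only [List.any_cons, List.any_nil, Bool.if_false_left, Bool.and_eq_true,
    Bool.or_eq_true, Bool.not_eq_true', Bool.and_eq_false_iff,
    decide_eq_true_eq, decide_eq_false_iff_not, not_le, Bool.false_eq_true, or_false]
  omega
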